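-- pv_equiv track=rewrite | github.com/fernandoalexandre/adventofcode2021 | day8/main.py | get_common_dict
-- ===== SOURCE A (Python) =====
-- def get_common_dict(signals, should_reverse = False) -> list:
--     # returns a dict with 3_5_5_5_6_6_6_7 => a
--     new_dict = {}
--     result_dict = {}
--     for character in ["a", "b", "c", "d", "e", "f", "g"]:
--         curr_value = []
--         for values in signals:
--             if character in values:
--                 curr_value.append(len(values))
--         result_dict[character] = sorted(curr_value)
--
--     for key in result_dict.keys():
--         if should_reverse:
--             new_dict[key] = "_".join(map(str,result_dict[key]))
--         else:
--             new_dict["_".join(map(str,result_dict[key]))] = key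
--
--     return new_dict
-- ===== SOURCE B (Python) =====
-- def get_common_dict(signals, should_reverse=False) -> list:
--     # One flattening pass builds (letter, length) pairs; a grouping loop then
--     # fills a pre-seeded a..g index, replacing A's 7 repeated scans of signals.
--     pairs = [(c, len(v)) for v in signals for c in dict.fromkeys(v) if c in "abcdefg"]
--     lengths = {c: [] for c in "abcdefg"}
--     for c, n in pairs:
--         lengths[c].append(n)
--     out = {}
--     for c in "abcdefg":
--         sig = "_".join(map(str, sorted(lengths[c])))
--         if should_reverse:
--             out[c] = sig
--         else:
--             out[sig] = c
--     return out
-- ===== Notes on version B (the rewrite author's own statement) =====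
-- stated objective: alternative
-- what changed: A scans the whole signals list once per letter (7 passes, each with its own inner loop); B makes a single flattening pass producing (letter,length) pairs, groups them into a pre-seeded a..g index in one pass, then emits the dict from that index.
import Mathlib
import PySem

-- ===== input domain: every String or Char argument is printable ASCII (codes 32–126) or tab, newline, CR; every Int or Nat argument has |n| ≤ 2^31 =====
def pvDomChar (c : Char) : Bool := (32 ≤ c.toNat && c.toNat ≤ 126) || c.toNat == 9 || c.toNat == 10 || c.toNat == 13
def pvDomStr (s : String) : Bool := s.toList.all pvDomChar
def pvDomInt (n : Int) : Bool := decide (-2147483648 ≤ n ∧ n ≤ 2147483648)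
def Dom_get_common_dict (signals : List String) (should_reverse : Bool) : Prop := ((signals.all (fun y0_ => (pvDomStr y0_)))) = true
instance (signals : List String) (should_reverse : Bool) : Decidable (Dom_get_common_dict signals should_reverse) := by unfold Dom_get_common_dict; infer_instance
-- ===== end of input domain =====

-- B replaces A's seven scans of `signals` (one per letter) by a single flattening pass
-- producing (letter, length) pairs plus one grouping pass over those pairs (objective: alternative decomposition).

-- ===== PORT A =====
def get_common_dict (signals : List String) (should_reverse : Bool) : List (String × String) :=
  let result_dict : PySem.Dict String (List Int) :=
    ["a", "b", "c", "d", "e", "f", "g"].foldl (fun rd character =>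
      rd.insert character (PySem.List.sorted
        (signals.foldl (fun cv values =>
          if PySem.Str.isIn character values then cv ++ [PySem.Str.len values] else cv) [])
        (fun x => x) false)) PySem.Dict.empty
  let new_dict : PySem.Dict String String :=
    result_dict.keys.foldl (fun nd key =>
      if should_reverse then
        nd.insert key (PySem.Str.join "_" ((result_dict.getD key []).map PySem.Int.toStr))
      else
        nd.insert (PySem.Str.join "_" ((result_dict.getD key []).map PySem.Int.toStr)) key)
      PySem.Dict.empty
  new_dict.items

-- ===== PORT B =====
def get_common_dict_alt (signals : List String) (should_reverse : Bool) : List (String × String) :=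
  let pairs : List (Char × Int) :=
    signals.flatMap (fun v =>
      ((PySem.List.dedup v.toList).filter
        (fun c => PySem.Chars.isIn [c] "abcdefg".toList)).map (fun c => (c, PySem.Str.len v)))
  let lengths : PySem.Dict Char (List Int) :=
    pairs.foldl (fun d p => d.modify p.1 [] (· ++ [p.2]))
      ("abcdefg".toList.foldl (fun d c => d.insert c ([] : List Int)) PySem.Dict.empty)
  let out : PySem.Dict String String :=
    "abcdefg".toList.foldl (fun out c =>
      if should_reverse then
        out.insert (String.ofList [c]) (PySem.Str.join "_"
          ((PySem.List.sorted (lengths.getD c []) (fun x => x) false).map PySem.Int.toStr))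
      else
        out.insert (PySem.Str.join "_"
          ((PySem.List.sorted (lengths.getD c []) (fun x => x) false).map PySem.Int.toStr))
          (String.ofList [c])) PySem.Dict.empty
  out.items

-- ===== PRECONDITION & SPEC =====
def Spec_get_common_dict (signals : List String) (should_reverse : Bool) (out : List (String × String)) : Prop := out = get_common_dict_alt signals should_reverse
instance (signals : List String) (should_reverse : Bool) (out : List (String × String)) : Decidable (Spec_get_common_dict signals should_reverse out) := by unfold Spec_get_common_dict; infer_instance

-- ===== CLAIM (what is proved, stated in full; the proofs are below) =====
def Claim_equal_get_common_dict : Prop := ∀ (signals : List String) (should_reverse : Bool), Dom_get_common_dict signals should_reverse → Spec_get_common_dict signals should_reverse (get_common_dict signals should_reverse)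

-- ===== LEMMAS AND PROOFS =====

-- the per-letter length list both programs compute
def pvLens (signals : List String) (c : Char) : List Int :=
  (signals.filter (fun v => c ∈ v.toList)).map PySem.Str.len

lemma pv_isIn_single (c : Char) (l : List Char) :
    PySem.Chars.isIn [c] l = l.contains c := by
  by_cases h : c ∈ l
  · simp [h, PySem.Chars.isIn_iff_infix, List.singleton_infix_iff]
  · simp [h, PySem.Chars.isIn_eq_false_iff, List.singleton_infix_iff]

lemma pvA_inner (signals : List String) (c : Char) :
    signals.foldl (fun cv values =>
      if PySem.Str.isIn (String.ofList [c]) values then cv ++ [PySem.Str.len values] else cv) []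
      = pvLens signals c := by
  rw [PySem.List.foldl_append_if (fun values => PySem.Str.isIn (String.ofList [c]) values)
    PySem.Str.len signals []]
  simp only [List.nil_append, pvLens]
  congr 1
  apply List.filter_congr
  intro v _
  simp [PySem.Str.isIn_eq, pv_isIn_single]

lemma pv_sel (l : List Char) (c : Char) (q : Char → Bool) (h : l.Nodup) (hq : q c = true) :
    (l.filter q).filter (fun x => x == c) = if c ∈ l then [c] else [] := by
  induction l with
  | nil => rfl
  | cons a t ih =>
    rcases List.nodup_cons.mp h with ⟨ha, ht⟩
    by_cases hac : a = c
    · subst hac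
      simp [hq, ha, ih ht]
    · simp only [List.filter_cons]
      by_cases hqa : q a = true <;>
        simp [hqa, hac, ih ht, List.mem_cons, Ne.symm hac]

lemma pvB_group (signals : List String) (c : Char) (hc : c ∈ "abcdefg".toList) :
    ((signals.flatMap (fun v =>
      ((PySem.List.dedup v.toList).filter
        (fun c => PySem.Chars.isIn [c] "abcdefg".toList)).map (fun c => (c, PySem.Str.len v)))).filter
        (fun p => p.1 == c)).map (fun x => x.2) = pvLens signals c := by
  induction signals with
  | nil => rfl
  | cons v t ih =>
    simp only [List.flatMap_cons, List.filter_append, List.map_append, ih, pvLens,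
      List.filter_cons]
    have hqc : PySem.Chars.isIn [c] "abcdefg".toList = true := by
      rw [pv_isIn_single]; exact List.elem_eq_true_of_mem hc
    have hsel := pv_sel (PySem.List.dedup v.toList)
      c (fun c => PySem.Chars.isIn [c] "abcdefg".toList) (PySem.List.nodup_dedup _) hqc
    rw [List.filter_map, List.map_map]
    have : ((fun p : Char × Int => p.1 == c) ∘ fun c => (c, PySem.Str.len v))
        = fun x => x == c := rfl
    rw [this, hsel]
    by_cases hm : c ∈ v.toList <;>
      simp [hm]


-- canonical common form of both outputs
def pvSig (signals : List String) (c : Char) : String :=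
  PySem.Str.join "_" ((PySem.List.sorted (pvLens signals c) (fun x => x) false).map PySem.Int.toStr)

def pvL7 : List Char := ['a', 'b', 'c', 'd', 'e', 'f', 'g']

def pvCanon (signals : List String) (rev : Bool) : List (String × String) :=
  (pvL7.foldl (fun nd c =>
    if rev then nd.insert (String.ofList [c]) (pvSig signals c)
    else nd.insert (pvSig signals c) (String.ofList [c])) PySem.Dict.empty).items

-- A's inner accumulator, as a function of the letter
def pvW (signals : List String) (ch : String) : List Int :=
  PySem.List.sorted
    (signals.foldl (fun cv values =>
      if PySem.Str.isIn ch values = true then cv ++ [PySem.Str.len values] else cv) [])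
    (fun x => x) false

lemma pv_mem7 (c : Char) (h : c ∈ "abcdefg".toList) :
    c = 'a' ∨ c = 'b' ∨ c = 'c' ∨ c = 'd' ∨ c = 'e' ∨ c = 'f' ∨ c = 'g' := by
  have h' : c ∈ ['a', 'b', 'c', 'd', 'e', 'f', 'g'] := h
  simpa using h'

lemma pvA_eq (signals : List String) (rev : Bool) :
    get_common_dict signals rev = pvCanon signals rev := by
  unfold get_common_dict
  show (List.foldl
        (fun nd key =>
          if rev = true then nd.insert key (PySem.Str.join "_" (List.map PySem.Int.toStr
            ((List.foldl (fun rd character => rd.insert character (pvW signals character))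
              PySem.Dict.empty ["a", "b", "c", "d", "e", "f", "g"]).getD key [])))
          else nd.insert (PySem.Str.join "_" (List.map PySem.Int.toStr
            ((List.foldl (fun rd character => rd.insert character (pvW signals character))
              PySem.Dict.empty ["a", "b", "c", "d", "e", "f", "g"]).getD key []))) key)
        PySem.Dict.empty
        (List.foldl (fun rd character => rd.insert character (pvW signals character))
          PySem.Dict.empty ["a", "b", "c", "d", "e", "f", "g"]).keys).items = pvCanon signals rev
  have hitems : (List.foldl (fun rd character => rd.insert character (pvW signals character))
      PySem.Dict.empty ["a", "b", "c", "d", "e", "f", "g"]).items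
      = (["a", "b", "c", "d", "e", "f", "g"] : List String).map (fun ch => (ch, pvW signals ch)) := by
    have := PySem.Dict.items_foldl_insert_fresh (["a", "b", "c", "d", "e", "f", "g"] : List String)
      (fun a => a) (pvW signals) PySem.Dict.empty (by simp) (by simp)
    simpa using this
  have hkeys : (List.foldl (fun rd character => rd.insert character (pvW signals character))
      PySem.Dict.empty ["a", "b", "c", "d", "e", "f", "g"]).keys
      = (["a", "b", "c", "d", "e", "f", "g"] : List String) := by
    simp only [PySem.Dict.keys]
    rw [hitems]
    simp
  have hget : ∀ ch ∈ (["a", "b", "c", "d", "e", "f", "g"] : List String),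
      (List.foldl (fun rd character => rd.insert character (pvW signals character))
        PySem.Dict.empty ["a", "b", "c", "d", "e", "f", "g"]).getD ch [] = pvW signals ch := by
    intro ch hch
    refine PySem.Dict.getD_of_get?_eq_some _ _ (PySem.Dict.get?_of_mem_items _ ?_ ?_)
    · rw [hitems]; exact List.mem_map_of_mem hch
    · rw [hkeys]; decide
  rw [hkeys]
  rw [PySem.List.foldl_congr_mem (["a", "b", "c", "d", "e", "f", "g"] : List String) _
    (fun nd key =>
      if rev = true then nd.insert key (PySem.Str.join "_" (List.map PySem.Int.toStr (pvW signals key)))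
      else nd.insert (PySem.Str.join "_" (List.map PySem.Int.toStr (pvW signals key))) key)
    PySem.Dict.empty (by intro acc x hx; rw [hget x hx])]
  have hmap : (["a", "b", "c", "d", "e", "f", "g"] : List String)
      = pvL7.map (fun c => String.ofList [c]) := by decide
  rw [hmap, List.foldl_map]
  rw [PySem.List.foldl_congr_mem pvL7 _
    (fun nd c =>
      if rev = true then nd.insert (String.ofList [c]) (pvSig signals c)
      else nd.insert (pvSig signals c) (String.ofList [c]))
    PySem.Dict.empty
    (by intro acc c hc
        have hw : pvW signals (String.ofList [c])
            = PySem.List.sorted (pvLens signals c) (fun x => x) false := by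
          unfold pvW; rw [pvA_inner]
        simp only [pvSig, hw])]
  rfl

lemma pvB_eq (signals : List String) (rev : Bool) :
    get_common_dict_alt signals rev = pvCanon signals rev := by
  unfold get_common_dict_alt
  show (List.foldl
      (fun out c =>
        if rev = true then
          out.insert (String.ofList [c]) (PySem.Str.join "_" (List.map PySem.Int.toStr
            (PySem.List.sorted ((List.foldl (fun d p => d.modify p.1 [] fun x => x ++ [p.2])
        (List.foldl (fun d c => d.insert c ([] : List Int)) PySem.Dict.empty "abcdefg".toList)
        (signals.flatMap (fun v =>
          ((PySem.List.dedup v.toList).filter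
            (fun c => PySem.Chars.isIn [c] "abcdefg".toList)).map
            (fun c => (c, PySem.Str.len v))))).getD c []) (fun x => x) false)))
        else
          out.insert (PySem.Str.join "_" (List.map PySem.Int.toStr
            (PySem.List.sorted ((List.foldl (fun d p => d.modify p.1 [] fun x => x ++ [p.2])
        (List.foldl (fun d c => d.insert c ([] : List Int)) PySem.Dict.empty "abcdefg".toList)
        (signals.flatMap (fun v =>
          ((PySem.List.dedup v.toList).filter
            (fun c => PySem.Chars.isIn [c] "abcdefg".toList)).map
            (fun c => (c, PySem.Str.len v))))).getD c []) (fun x => x) false))) (String.ofList [c]))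
      PySem.Dict.empty "abcdefg".toList).items = pvCanon signals rev
  have hlen : ∀ c ∈ "abcdefg".toList,
      (List.foldl (fun d p => d.modify p.1 [] fun x => x ++ [p.2])
        (List.foldl (fun d c => d.insert c ([] : List Int)) PySem.Dict.empty "abcdefg".toList)
        (signals.flatMap (fun v =>
          ((PySem.List.dedup v.toList).filter
            (fun c => PySem.Chars.isIn [c] "abcdefg".toList)).map
            (fun c => (c, PySem.Str.len v))))).getD c []
      = pvLens signals c := by
    intro c hc
    rw [PySem.Dict.getD_foldl_modify_append]
    have hseed : (List.foldl (fun d c => d.insert c ([] : List Int))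
        PySem.Dict.empty "abcdefg".toList).getD c [] = [] := by
      rcases pv_mem7 c hc with h | h | h | h | h | h | h <;> subst h <;> decide
    rw [hseed, List.nil_append]
    exact pvB_group signals c hc
  rw [PySem.List.foldl_congr_mem "abcdefg".toList _
    (fun out c =>
      if rev = true then out.insert (String.ofList [c]) (pvSig signals c)
      else out.insert (pvSig signals c) (String.ofList [c]))
    PySem.Dict.empty
    (by intro acc c hc; simp only [pvSig, hlen c hc])]
  rfl

-- ===== VERDICT (by name: the statement is the Claim_ definition above) =====
theorem get_common_dict_spec : Claim_equal_get_common_dict := by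
  intro signals rev _
  unfold Spec_get_common_dict
  rw [pvA_eq, pvB_eq]
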